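-- pv_equiv track=rewrite | github.com/wasp-os/wasp-os | wasp/apps/heart.py | trough
-- ===== SOURCE A (Python) =====
-- def _compare(d1, d2, count, shift):
--     e = 0
--     for i in range(count):
--         d = d1[i] - d2[i]
--         e += d*d
--     return e
--
-- def compare(d, shift):
--     return _compare(d[shift:], d[:-shift], len(d)-shift, shift)
--
-- def trough(d, mn, mx):
--     z2 = compare(d, mn-2)
--     z1 = compare(d, mn-1)
--     for i in range(mn, mx+1):
--         z = compare(d, i)
--         if z2 > z1 and z1 < z:
--             return i
--         z2 = z1
--         z1 = z
--
--     return -1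
-- ===== SOURCE B (Python) =====
-- def trough(d, mn, mx):
--     n = len(d)
--     # prefix sums of squares: pref[k] = d[0]^2 + ... + d[k-1]^2
--     pref = [0]
--     for x in d:
--         pref.append(pref[-1] + x * x)
--     total = pref[n]
--
--     def energy(s):
--         # sum((d[i+s]-d[i])**2 for i in range(n-s))
--         #   = (total - pref[s]) + pref[n-s] - 2 * cross(s)
--         if s >= n:
--             return 0
--         cross = 0
--         for i in range(n - s):
--             cross += d[i] * d[i + s]
--         return total - pref[s] + pref[n - s] - 2 * cross
--
--     # every lag >= n has zero energy, so no local minimum can start past n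
--     hi = min(mx, n)
--     es = [energy(s) for s in range(mn - 2, hi + 1)]
--     for j in range(2, len(es)):
--         if es[j - 2] > es[j - 1] and es[j - 1] < es[j]:
--             return mn - 2 + j
--     return -1
-- ===== Notes on version B (the rewrite author's own statement) =====
-- stated objective: alternative
-- what changed: B replaces A's per-lag slice-copy-and-squared-difference loop by the algebraic identity e(s) = (total - pref[s]) + pref[n-s] - 2*cross(s) over a once-built prefix-sum-of-squares table, precomputes the energy table for all lags and then scans it for the first local minimum, instead of A's interleaved rolling z2/z1 comparison with early return.
import Mathlib
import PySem

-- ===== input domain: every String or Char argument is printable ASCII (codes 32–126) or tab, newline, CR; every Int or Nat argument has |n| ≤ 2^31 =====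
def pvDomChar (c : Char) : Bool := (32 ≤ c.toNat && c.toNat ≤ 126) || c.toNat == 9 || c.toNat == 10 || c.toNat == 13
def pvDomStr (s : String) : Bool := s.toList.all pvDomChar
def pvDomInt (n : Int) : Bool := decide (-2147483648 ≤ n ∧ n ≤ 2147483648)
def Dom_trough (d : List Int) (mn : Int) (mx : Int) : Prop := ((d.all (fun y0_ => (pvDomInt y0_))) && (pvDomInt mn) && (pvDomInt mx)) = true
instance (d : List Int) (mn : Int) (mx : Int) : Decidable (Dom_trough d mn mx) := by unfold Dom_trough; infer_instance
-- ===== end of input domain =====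

-- B computes each lag energy from a prefix-sum-of-squares table plus a cross term
-- (e(s) = total - pref[s] + pref[n-s] - 2*cross(s)), builds the whole energy table,
-- and then scans it for the first local minimum (alternative decomposition, same cost).

-- ===== PORT A =====
-- Python: _compare(d1, d2, count, shift) — shift is an unused parameter, kept for fidelity.
def pvCompareInner (d1 d2 : List Int) (count : Int) (_shift : Int) : Int :=
  -- 'd = d1[i] - d2[i]; e += d*d' with the single-use temporary inlined
  (PySem.List.pyRange 0 count 1).foldl
    (fun e i =>
      e + (PySem.List.pyGetD d1 i 0 - PySem.List.pyGetD d2 i 0)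
        * (PySem.List.pyGetD d1 i 0 - PySem.List.pyGetD d2 i 0)) 0

-- Python: compare(d, shift) = _compare(d[shift:], d[:-shift], len(d)-shift, shift)
def pvCompare (d : List Int) (shift : Int) : Int :=
  pvCompareInner (PySem.List.slice d (some shift) none)
    (PySem.List.slice d none (some (-shift)))
    ((d.length : Int) - shift) shift

-- the 'for i in range(mn, mx+1)' loop with its early return and rolling (z2, z1);
-- the range is consumed lazily (current index i plus a count of remaining iterations)
def pvTroughLoop (d : List Int) (fuel : Nat) (i : Int) (z2 z1 : Int) : Int :=
  match fuel with
  | 0 => -1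
  | fuel + 1 =>
    let z := pvCompare d i
    if z2 > z1 ∧ z1 < z then i else pvTroughLoop d fuel (i + 1) z1 z

def trough (d : List Int) (mn : Int) (mx : Int) : Int :=
  pvTroughLoop d (mx + 1 - mn).toNat mn (pvCompare d (mn - 2)) (pvCompare d (mn - 1))

-- ===== PORT B =====
-- pref = [0]; for x in d: pref.append(pref[-1] + x*x)
def pvPref (d : List Int) : List Int :=
  d.foldl (fun p x => p ++ [PySem.List.pyGetD p (-1) 0 + x * x]) [0]

-- energy(s): square terms from the prefix table, cross term in one pass
def pvEnergy (d : List Int) (pref : List Int) (total : Int) (s : Int) : Int :=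
  -- 'cross' is single-use and inlined into the return expression
  if s ≥ (d.length : Int) then 0
  else
    total - PySem.List.pyGetD pref s 0 + PySem.List.pyGetD pref ((d.length : Int) - s) 0
      - 2 * ((PySem.List.pyRange 0 ((d.length : Int) - s) 1).foldl
          (fun c i => c + PySem.List.pyGetD d i 0 * PySem.List.pyGetD d (i + s) 0) 0)

-- for j in range(2, len(es)): check the adjacent triple, early return mn-2+j
def pvScan (es : List Int) (mn : Int) (js : List Int) : Int :=
  match js with
  | [] => -1
  | j :: rest =>
    if PySem.List.pyGetD es (j - 2) 0 > PySem.List.pyGetD es (j - 1) 0 ∧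
       PySem.List.pyGetD es (j - 1) 0 < PySem.List.pyGetD es j 0
    then mn - 2 + j else pvScan es mn rest

def trough_alt (d : List Int) (mn : Int) (mx : Int) : Int :=
  let pref := pvPref d
  let total := PySem.List.pyGetD pref (d.length : Int) 0
  let hi := min mx (d.length : Int)
  let es := (PySem.List.pyRange (mn - 2) (hi + 1) 1).map (pvEnergy d pref total)
  pvScan es mn (PySem.List.pyRange 2 (es.length : Int) 1)

-- ===== PRECONDITION & SPEC =====
-- Pre_ excludes exactly the inputs on which A raises IndexError: any shift ≤ 0 on a
-- nonempty list makes _compare index past a slice's end (shift mn-2 is computed first),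
-- while on an empty list only a negative shift (mn ≤ 1) raises.
def Pre_trough (d : List Int) (mn : Int) (mx : Int) : Prop :=
  3 ≤ mn ∨ (d = [] ∧ 2 ≤ mn)
instance (d : List Int) (mn : Int) (mx : Int) : Decidable (Pre_trough d mn mx) := by
  unfold Pre_trough; infer_instance

def pvWitness_trough : List Int × Int × Int := ([5, 1, 5, 1, 5, 1, 5, 1], 3, 6)

def Spec_trough (d : List Int) (mn : Int) (mx : Int) (out : Int) : Prop := out = trough_alt d mn mx
instance (d : List Int) (mn : Int) (mx : Int) (out : Int) : Decidable (Spec_trough d mn mx out) := by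
  unfold Spec_trough; infer_instance

-- ===== CLAIM (what is proved, stated in full; the proofs are below) =====
def Claim_equal_trough : Prop := ∀ (d : List Int) (mn : Int) (mx : Int),
  Dom_trough d mn mx → Pre_trough d mn mx → Spec_trough d mn mx (trough d mn mx)

-- ===== LEMMAS AND PROOFS =====

-- common abstraction: first index i in [i0, i0+k) whose triple (f(i-2), f(i-1), f(i)) is a trough
def pvFirst (f : Int → Int) (i : Int) : Nat → Int
  | 0 => -1
  | k + 1 => if f (i - 2) > f (i - 1) ∧ f (i - 1) < f i then i else pvFirst f (i + 1) k

lemma pvFirst_congr (f g : Int → Int) :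
    ∀ (k : Nat) (i : Int), (∀ x, i - 2 ≤ x → x < i + k → f x = g x) →
      pvFirst f i k = pvFirst g i k := by
  intro k
  induction k with
  | zero => intro i _; rfl
  | succ k ih =>
    intro i h
    have h2 : f (i - 2) = g (i - 2) := h _ le_rfl (by push_cast; omega)
    have h1 : f (i - 1) = g (i - 1) := h _ (by omega) (by push_cast; omega)
    have h0 : f i = g i := h _ (by omega) (by push_cast; omega)
    simp only [pvFirst, h2, h1, h0]
    split_ifs with hc
    · rfl
    · exact ih (i + 1) (fun x hx1 hx2 => h x (by omega) (by push_cast at hx2 ⊢; omega))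

-- A's loop is pvFirst of pvCompare
lemma troughLoop_eq_pvFirst (d : List Int) :
    ∀ (k : Nat) (i : Int),
      pvTroughLoop d k i (pvCompare d (i - 2)) (pvCompare d (i - 1))
        = pvFirst (pvCompare d) i k := by
  intro k
  induction k with
  | zero => intro i; rfl
  | succ k ih =>
    intro i
    simp only [pvTroughLoop, pvFirst]
    split_ifs with hc
    · rfl
    · have h := ih (i + 1)
      have e2 : i + 1 - 2 = i - 1 := by ring
      have e1 : i + 1 - 1 = i := by ring
      rw [e2, e1] at h
      exact h

-- a scan over indices whose triples are all zero finds nothing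
lemma pvFirst_zero (f : Int → Int) :
    ∀ (m : Nat) (i : Int), (∀ x, i - 1 ≤ x → f x = 0) → pvFirst f i m = -1 := by
  intro m
  induction m with
  | zero => intro i _; rfl
  | succ m ih =>
    intro i h
    have h1 : f (i - 1) = 0 := h _ le_rfl
    have h0 : f i = 0 := h _ (by omega)
    simp only [pvFirst]
    rw [if_neg (by rw [h1, h0]; omega)]
    exact ih (i + 1) (fun x hx => h x (by omega))

-- splitting a scan: the tail only matters if the head found nothing
lemma pvFirst_add (f : Int → Int) (k1 m : Nat) :
    ∀ (i : Int), 0 ≤ i →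
      pvFirst f i (k1 + m)
        = if pvFirst f i k1 = -1 then pvFirst f (i + (k1 : Int)) m else pvFirst f i k1 := by
  induction k1 with
  | zero =>
    intro i _
    rw [Nat.zero_add]
    simp [pvFirst]
  | succ k1 ih =>
    intro i hi
    rw [show k1 + 1 + m = (k1 + m) + 1 from by omega]
    simp only [pvFirst]
    by_cases hc : f (i - 2) > f (i - 1) ∧ f (i - 1) < f i
    · rw [if_pos hc, if_pos hc, if_neg (by omega)]
    · rw [if_neg hc, if_neg hc, ih (i + 1) (by omega)]
      have harg : i + 1 + (k1 : Int) = i + ((k1 : Nat) + 1 : Int) := by push_cast; ring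
      rw [harg]
      norm_cast

-- recursive characterization of the prefix list built by pvPref's foldl
def pvTail (a : Int) : List Int → List Int
  | [] => []
  | x :: xs => (a + x * x) :: pvTail (a + x * x) xs

lemma pvPref_build :
    ∀ (l p : List Int), p ≠ [] →
      l.foldl (fun p x => p ++ [PySem.List.pyGetD p (-1) 0 + x * x]) p
        = p ++ pvTail (PySem.List.pyGetD p (-1) 0) l := by
  intro l
  induction l with
  | nil => intro p _; simp [pvTail]
  | cons x xs ih =>
    intro p hp
    simp only [List.foldl_cons]
    rw [ih (p ++ [PySem.List.pyGetD p (-1) 0 + x * x]) (by simp)]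
    rw [PySem.List.pyGetD_neg_one_append_singleton]
    simp [pvTail]

lemma pvTail_getD (l : List Int) :
    ∀ (k : Nat) (a : Int), k < l.length →
      (pvTail a l).getD k 0 = a + ∑ i ∈ Finset.range (k + 1), l.getD i 0 * l.getD i 0 := by
  induction l with
  | nil => intro k a h; simp at h
  | cons x xs ih =>
    intro k a h
    cases k with
    | zero => simp [pvTail]
    | succ k =>
      simp only [pvTail, List.getD_cons_succ]
      rw [ih k (a + x * x) (by simpa using h)]
      rw [Finset.sum_range_succ' (fun i => (x :: xs).getD i 0 * (x :: xs).getD i 0)]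
      simp only [List.getD_cons_succ, List.getD_cons_zero]
      ring

lemma pvPref_getD (d : List Int) (k : Nat) (hk : k ≤ d.length) :
    (pvPref d).getD k 0 = ∑ i ∈ Finset.range k, d.getD i 0 * d.getD i 0 := by
  unfold pvPref
  rw [pvPref_build d [0] (by simp)]
  cases k with
  | zero => simp
  | succ k =>
    have : PySem.List.pyGetD ([0] : List Int) (-1) 0 = 0 := by decide
    rw [this]
    have hcons : ([0] : List Int) ++ pvTail 0 d = 0 :: pvTail 0 d := by simp
    rw [hcons]
    simp only [List.getD_cons_succ]
    rw [pvTail_getD d k 0 (by omega)]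
    ring

-- a foldl-accumulated sum over range(0, c) is a Finset sum
lemma foldl_pyRange_sum (f : Int → Int) :
    ∀ (m : Nat), (PySem.List.pyRange 0 (m : Int) 1).foldl (fun a i => a + f i) 0
      = ∑ k ∈ Finset.range m, f (k : Int) := by
  intro m
  induction m with
  | zero => simp [PySem.List.pyRange_one_eq_nil]
  | succ m ih =>
    have hcast : ((m + 1 : Nat) : Int) = (m : Int) + 1 := by push_cast; ring
    rw [hcast, PySem.List.pyRange_one_succ_right (by positivity), List.foldl_append,
      Finset.sum_range_succ, ← ih]
    simp

-- indexing a mapped range with an Int index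
lemma pyGetD_map_pyRange_int (f : Int → Int) (a b j : Int) (h0 : 0 ≤ j)
    (h1 : j < (((PySem.List.pyRange a b 1).map f).length : Int)) :
    PySem.List.pyGetD ((PySem.List.pyRange a b 1).map f) j 0 = f (a + j) := by
  have hj : j = ((j.toNat : Nat) : Int) := by omega
  have hlen : ((PySem.List.pyRange a b 1).map f).length = (b - a).toNat := by
    simp [PySem.List.length_pyRange_one]
  have hk : j.toNat < (b - a).toNat := by omega
  rw [hj, PySem.List.pyGetD_map_pyRange_one f a b j.toNat 0 hk]

-- the core algebraic identity: A's squared-difference sum equals B's prefix/cross formula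
lemma compare_eq_energy (d : List Int) (s : Int)
    (hs : 1 ≤ s ∨ (d = [] ∧ 0 ≤ s)) :
    pvCompare d s
      = pvEnergy d (pvPref d) (PySem.List.pyGetD (pvPref d) (d.length : Int) 0) s := by
  rcases hs with hs | ⟨hnil, hs⟩
  · by_cases hbig : (d.length : Int) ≤ s
    · -- count ≤ 0 on A's side, guard fires on B's side
      unfold pvCompare pvCompareInner pvEnergy
      rw [PySem.List.pyRange_one_eq_nil (by omega)]
      simp [hbig]
    · rw [not_le] at hbig
      set n := d.length with hn
      set t := s.toNat with ht
      have hts : (t : Int) = s := by omega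
      have htn : t < n := by omega
      have ht1 : 1 ≤ t := by omega
      -- A's side
      have hd1 : PySem.List.slice d (some s) none = d.drop t := by
        rw [PySem.List.slice_from d (by omega)]
      have hd2 : PySem.List.slice d none (some (-s)) = d.take (n - t) := by
        rw [← hts, PySem.List.slice_to_neg_natCast d t (by omega)]
      have hcount : (n : Int) - s = ((n - t : Nat) : Int) := by omega
      unfold pvCompare pvCompareInner
      rw [hd1, hd2, hcount, foldl_pyRange_sum]
      -- B's side
      unfold pvEnergy
      rw [if_neg (by omega)]
      rw [hcount, foldl_pyRange_sum]
      -- pref lookups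
      have hpref_s : PySem.List.pyGetD (pvPref d) s 0
          = ∑ i ∈ Finset.range t, d.getD i 0 * d.getD i 0 := by
        rw [← hts, PySem.List.pyGetD_natCast, pvPref_getD d t (by omega)]
      have hpref_c : PySem.List.pyGetD (pvPref d) ((n - t : Nat) : Int) 0
          = ∑ i ∈ Finset.range (n - t), d.getD i 0 * d.getD i 0 := by
        rw [PySem.List.pyGetD_natCast, pvPref_getD d (n - t) (by omega)]
      have hpref_n : PySem.List.pyGetD (pvPref d) ((n : Nat) : Int) 0
          = ∑ i ∈ Finset.range n, d.getD i 0 * d.getD i 0 := by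
        rw [PySem.List.pyGetD_natCast, pvPref_getD d n (by omega)]
      rw [hpref_s, hpref_c, hpref_n]
      -- pointwise rewriting of the three sums
      have hA : ∀ k ∈ Finset.range (n - t),
          PySem.List.pyGetD (d.drop t) (k : Int) 0 = d.getD (t + k) 0 := by
        intro k hk
        rw [PySem.List.pyGetD_natCast]
        have hk' : k < n - t := Finset.mem_range.mp hk
        rw [List.getD_eq_getElem _ _ (by simpa [hn] using hk'),
            List.getD_eq_getElem _ _ (by omega), List.getElem_drop]
      have hB : ∀ k ∈ Finset.range (n - t),
          PySem.List.pyGetD (d.take (n - t)) (k : Int) 0 = d.getD k 0 := by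
        intro k hk
        rw [PySem.List.pyGetD_natCast]
        have hk' : k < n - t := Finset.mem_range.mp hk
        rw [List.getD_eq_getElem _ _ (by simp [hn]; omega),
            List.getD_eq_getElem _ _ (by omega), List.getElem_take]
      have hC : ∀ k ∈ Finset.range (n - t),
          PySem.List.pyGetD d ((k : Int) + s) 0 = d.getD (t + k) 0 := by
        intro k hk
        have : (k : Int) + s = ((t + k : Nat) : Int) := by omega
        rw [this, PySem.List.pyGetD_natCast]
      -- the square terms from the prefix table
      have hsq : (∑ i ∈ Finset.range n, d.getD i 0 * d.getD i 0)
            - (∑ i ∈ Finset.range t, d.getD i 0 * d.getD i 0)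
          = ∑ k ∈ Finset.range (n - t), d.getD (t + k) 0 * d.getD (t + k) 0 := by
        rw [← Finset.sum_Ico_eq_sub _ (by omega : t ≤ n),
            Finset.sum_Ico_eq_sum_range]
      calc (∑ k ∈ Finset.range (n - t),
              (PySem.List.pyGetD (d.drop t) (k : Int) 0 - PySem.List.pyGetD (d.take (n - t)) (k : Int) 0)
            * (PySem.List.pyGetD (d.drop t) (k : Int) 0 - PySem.List.pyGetD (d.take (n - t)) (k : Int) 0))
          = ∑ k ∈ Finset.range (n - t),
              (d.getD (t + k) 0 * d.getD (t + k) 0 + d.getD k 0 * d.getD k 0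
                - 2 * (d.getD k 0 * d.getD (t + k) 0)) := by
            apply Finset.sum_congr rfl
            intro k hk
            rw [hA k hk, hB k hk]
            ring
        _ = (∑ k ∈ Finset.range (n - t), d.getD (t + k) 0 * d.getD (t + k) 0)
            + (∑ k ∈ Finset.range (n - t), d.getD k 0 * d.getD k 0)
            - 2 * ∑ k ∈ Finset.range (n - t), d.getD k 0 * d.getD (t + k) 0 := by
            rw [Finset.sum_sub_distrib, Finset.sum_add_distrib, Finset.mul_sum]
        _ = _ := by
            rw [← hsq]
            have hcross : ∑ k ∈ Finset.range (n - t),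
                PySem.List.pyGetD d (k : Int) 0 * PySem.List.pyGetD d ((k : Int) + s) 0
                = ∑ k ∈ Finset.range (n - t), d.getD k 0 * d.getD (t + k) 0 := by
              apply Finset.sum_congr rfl
              intro k hk
              rw [PySem.List.pyGetD_natCast, hC k hk]
            rw [hcross]
  · -- empty list: both sides are 0
    subst hnil
    unfold pvCompare pvCompareInner pvEnergy
    rw [PySem.List.pyRange_one_eq_nil (by simpa using by omega)]
    simp [hs]

-- B's scan over the precomputed table is pvFirst of the energy function
lemma scan_eq_pvFirst (d pref : List Int) (total mn mx : Int) :
    ∀ (k : Nat) (j : Int), 2 ≤ j →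
      j + (k : Int) = ((((PySem.List.pyRange (mn - 2) (mx + 1) 1).map (pvEnergy d pref total)).length : Nat) : Int) →
      pvScan ((PySem.List.pyRange (mn - 2) (mx + 1) 1).map (pvEnergy d pref total)) mn
          (PySem.List.pyRange j (j + (k : Int)) 1)
        = pvFirst (pvEnergy d pref total) (mn - 2 + j) k := by
  intro k
  induction k with
  | zero =>
    intro j _ _
    rw [PySem.List.pyRange_one_eq_nil (a := j) (b := j + ((0 : Nat) : Int)) (by push_cast; omega)]
    rfl
  | succ k ih =>
    intro j hj hlen
    rw [PySem.List.pyRange_one_cons (a := j) (b := j + (((k : Nat) + 1 : Nat) : Int)) (by push_cast; omega)]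
    simp only [pvScan, pvFirst]
    rw [pyGetD_map_pyRange_int _ _ _ (j - 2) (by omega) (by push_cast at hlen ⊢; omega)]
    rw [pyGetD_map_pyRange_int _ _ _ (j - 1) (by omega) (by push_cast at hlen ⊢; omega)]
    rw [pyGetD_map_pyRange_int _ _ _ j (by omega) (by push_cast at hlen ⊢; omega)]
    have e2 : mn - 2 + (j - 2) = mn - 2 + j - 2 := by ring
    have e1 : mn - 2 + (j - 1) = mn - 2 + j - 1 := by ring
    rw [e2, e1]
    split_ifs with hc
    · rfl
    · have hstep : j + ((k + 1 : Nat) : Int) = (j + 1) + (k : Int) := by push_cast; ring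
      rw [hstep, ih (j + 1) (by omega) (by push_cast at hlen ⊢; omega)]
      congr 1
      ring

-- ===== VERDICT (by name: the statement is the Claim_ definition above) =====
theorem trough_spec : Claim_equal_trough := by
  intro d mn mx _hdom hpre
  unfold Spec_trough
  have hmn2 : 2 ≤ mn := by rcases hpre with h | ⟨_, h⟩ <;> omega
  set n := d.length with hn
  set E := pvEnergy d (pvPref d) (PySem.List.pyGetD (pvPref d) ((n : Nat) : Int) 0) with hE
  set hi := min mx ((n : Nat) : Int) with hhi
  set k0 := (mx + 1 - mn).toNat with hk0
  set k1 := (hi + 1 - mn).toNat with hk1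
  -- A's side as pvFirst over the full range
  have hA : trough d mn mx = pvFirst (pvCompare d) mn k0 := troughLoop_eq_pvFirst d k0 mn
  -- B's side as pvFirst over the clamped range
  have hB : trough_alt d mn mx = pvFirst E mn k1 := by
    have hunfold : trough_alt d mn mx
        = pvScan ((PySem.List.pyRange (mn - 2) (hi + 1) 1).map E) mn
          (PySem.List.pyRange 2
            ((((PySem.List.pyRange (mn - 2) (hi + 1) 1).map E).length : Int)) 1) := rfl
    rw [hunfold]
    set es := (PySem.List.pyRange (mn - 2) (hi + 1) 1).map E with hes
    have hlen : es.length = (hi + 1 - (mn - 2)).toNat := by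
      rw [hes, List.length_map, PySem.List.length_pyRange_one]
    by_cases hdeg : (es.length : Int) ≤ 2
    · -- degenerate: empty scan on both sides
      rw [PySem.List.pyRange_one_eq_nil (a := 2) (b := (es.length : Int)) (by omega)]
      have hk10 : k1 = 0 := by omega
      rw [hk10]
      rfl
    · have h2 : (2 : Int) + ((es.length - 2 : Nat) : Int) = (es.length : Int) := by omega
      rw [← h2, hes, scan_eq_pvFirst d (pvPref d) _ mn hi (es.length - 2) 2 (by omega)
        (by rw [← hes]; omega)]
      have hmm : mn - 2 + 2 = mn := by ring
      rw [hmm]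
      congr 1
      omega
  -- the energy function vanishes from lag n on
  have hEzero : ∀ x : Int, ((n : Nat) : Int) ≤ x → E x = 0 := by
    intro x hx
    rw [hE]
    unfold pvEnergy
    rw [if_pos (by omega)]
  -- extend B's clamped scan to A's full range: the extra lags have zero energy
  have hsplit : pvFirst E mn k0 = pvFirst E mn k1 := by
    have hle : k1 ≤ k0 := by omega
    obtain ⟨m, hm⟩ : ∃ m, k0 = k1 + m := ⟨k0 - k1, by omega⟩
    rw [hm, pvFirst_add E k1 m mn (by omega)]
    by_cases hres : pvFirst E mn k1 = -1
    · rw [if_pos hres, hres]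
      cases m with
      | zero => rfl
      | succ m' =>
        apply pvFirst_zero
        intro x hx
        apply hEzero
        -- k1 < k0 forces hi = n and every extended lag index exceeds n
        omega
    · rw [if_neg hres]
  rw [hA, hB, ← hsplit]
  apply pvFirst_congr
  intro x hx1 _hx2
  apply compare_eq_energy
  rcases hpre with h3 | ⟨hnil, h2⟩
  · left; omega
  · right
    refine ⟨hnil, ?_⟩
    omega
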